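-- pv_equiv track=rewrite | github.com/kedro-org/kedro-viz | package/kedro_viz/models/graph.py | _expand_namespaces
-- ===== SOURCE A (Python) =====
-- from typing import TYPE_CHECKING, Any, Dict, List, Optional, Set, Union, cast
--
-- def _expand_namespaces(namespace: Optional[str]) -> List[str]:
--     """
--     Expand a node's namespace to the modular pipelines this node belongs to.
--     For example, if the node's namespace is: "pipeline1.data_science"
--     it should be expanded to: ["pipeline1", "pipeline1.data_science"]
--     """
--     if not namespace:
--         return []
--     namespace_list = []
--     namespace_chunks = namespace.split(".")
--     prefix = ""
--     for chunk in namespace_chunks: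
--         if prefix:
--             prefix = f"{prefix}.{chunk}"
--         else:
--             prefix = chunk
--         namespace_list.append(prefix)
--     return namespace_list
-- ===== SOURCE B (Python) =====
-- from typing import List, Optional
--
--
-- def _expand_namespaces(namespace: Optional[str]) -> List[str]:
--     if not namespace:
--         return []
--     chunks = namespace.split(".")
--     return [".".join(chunks[:i]) for i in range(1, len(chunks) + 1)]
-- ===== Notes on version B (the rewrite author's own statement) =====
-- stated objective: idiomatic
-- what changed: Drops the running-prefix accumulator loop: B splits once and builds each cumulative prefix directly as '.'.join(chunks[:i]) in a comprehension over prefix lengths.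
-- intended difference: On namespaces starting with '.', A's `if prefix:` truthiness silently collapses the leading empty chunk (A('.a') = ['', 'a']), while B returns the true cumulative dotted prefixes (['', '.a']), which is the function's stated purpose of expanding cumulative dotted prefixes. — e.g. on _expand_namespaces(some ".a"): A returns ["", "a"], B returns ["", ".a"]
import Mathlib
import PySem

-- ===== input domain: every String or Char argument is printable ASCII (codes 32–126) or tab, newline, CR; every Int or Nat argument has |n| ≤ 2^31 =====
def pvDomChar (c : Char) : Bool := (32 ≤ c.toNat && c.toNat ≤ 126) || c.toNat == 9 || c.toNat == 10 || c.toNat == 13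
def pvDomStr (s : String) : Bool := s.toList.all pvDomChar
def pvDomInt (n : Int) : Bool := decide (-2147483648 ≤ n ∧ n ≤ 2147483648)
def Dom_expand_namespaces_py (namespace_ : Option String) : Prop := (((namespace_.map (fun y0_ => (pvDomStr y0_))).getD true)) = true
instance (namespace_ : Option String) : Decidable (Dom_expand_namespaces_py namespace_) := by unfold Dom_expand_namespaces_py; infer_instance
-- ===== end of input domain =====

-- B replaces A's running-prefix accumulator loop by a single split plus a slice-and-join
-- comprehension (more idiomatic); on namespaces starting with '.', a stated intended difference
-- (D_ below), B agrees with A everywhere else.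

-- ===== PORT A =====
-- A's f-string `f"{prefix}.{chunk}"` is ported as PySem.Str.join "" [prefix, ".", chunk]
-- (plain string concatenation); `namespace.split(".")` has a nonempty separator, so
-- PySem.Str.split? is always `some` and `.getD []` only unwraps it.
def expand_namespaces_py (namespace_ : Option String) : List String :=
  match namespace_ with
  | none => []
  | some ns =>
    if ns = "" then []
    else
      let namespace_chunks := (PySem.Str.split? ns ".").getD []
      (namespace_chunks.foldl
        (fun (st : List String × String) chunk =>
          let prefix_ := if st.2 ≠ "" then PySem.Str.join "" [st.2, ".", chunk] else chunk
          (st.1 ++ [prefix_], prefix_))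
        ([], "")).1

-- ===== PORT B =====
def expand_namespaces_py_alt (namespace_ : Option String) : List String :=
  match namespace_ with
  | none => []
  | some ns =>
    if ns = "" then []
    else
      let chunks := (PySem.Str.split? ns ".").getD []
      (PySem.List.pyRange 1 ((chunks.length : Int) + 1)).map
        (fun i => PySem.Str.join "." (PySem.List.slice chunks none (some i)))

-- ===== PRECONDITION & SPEC =====
-- On namespaces starting with '.', A's `if prefix:` truthiness silently collapses the leading
-- empty chunk (A('.a') = ['', 'a']), while B returns the true cumulative dotted prefixes
-- (['', '.a']), which is the function's stated purpose.
def D_expand_namespaces_py (namespace_ : Option String) : Prop :=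
  ((namespace_.map (fun s => PySem.Str.startswith s ".")).getD false) = true
instance (namespace_ : Option String) : Decidable (D_expand_namespaces_py namespace_) := by
  unfold D_expand_namespaces_py; infer_instance

def Spec_expand_namespaces_py (namespace_ : Option String) (out : List String) : Prop :=
  ¬ D_expand_namespaces_py namespace_ → out = expand_namespaces_py_alt namespace_
instance (namespace_ : Option String) (out : List String) :
    Decidable (Spec_expand_namespaces_py namespace_ out) := by
  unfold Spec_expand_namespaces_py; infer_instance

def pvDiffWitness_expand_namespaces_py : Option String := some ".a"
def pvDiffWitnessOut_expand_namespaces_py : (List String) × (List String) :=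
  (["", "a"], ["", ".a"])

-- ===== CLAIM (what is proved, stated in full; the proofs are below) =====
def Claim_unchanged_expand_namespaces_py : Prop :=
  ∀ (namespace_ : Option String), Dom_expand_namespaces_py namespace_ →
    Spec_expand_namespaces_py namespace_ (expand_namespaces_py namespace_)
def Claim_changed_expand_namespaces_py : Prop :=
  Dom_expand_namespaces_py (pvDiffWitness_expand_namespaces_py) ∧
  D_expand_namespaces_py (pvDiffWitness_expand_namespaces_py) ∧
  expand_namespaces_py (pvDiffWitness_expand_namespaces_py) = pvDiffWitnessOut_expand_namespaces_py.1 ∧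
  expand_namespaces_py_alt (pvDiffWitness_expand_namespaces_py) = pvDiffWitnessOut_expand_namespaces_py.2 ∧
  pvDiffWitnessOut_expand_namespaces_py.1 ≠ pvDiffWitnessOut_expand_namespaces_py.2
def Claim_exact_expand_namespaces_py : Prop :=
  ∀ (namespace_ : Option String), Dom_expand_namespaces_py namespace_ →
    D_expand_namespaces_py namespace_ →
    expand_namespaces_py namespace_ ≠ expand_namespaces_py_alt namespace_

-- ===== LEMMAS AND PROOFS =====

-- the cumulative dotted prefixes of h :: cs (on `List Char`), the common shape of both ports
def scanPref : List Char → List (List Char) → List (List Char)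
  | h, [] => [h]
  | h, c :: cs => h :: scanPref (h ++ '.' :: c) cs

theorem scanPref_append (a : List Char) :
    ∀ (cs : List (List Char)) (x : List Char),
      scanPref (a ++ x) cs = (scanPref x cs).map (a ++ ·) := by
  intro cs
  induction cs with
  | nil => intro x; simp [scanPref]
  | cons c cs ih =>
    intro x
    simp only [scanPref, List.map_cons, List.cons.injEq, true_and]
    rw [List.append_assoc a x ('.' :: c)] at *
    exact ih (x ++ '.' :: c)

-- ---- splitOn.go equations and structure ----
theorem go_zero (sep l cur : List Char) (acc : List (List Char)) :
    PySem.Chars.splitOn.go sep 0 l cur acc = ((cur.reverse ++ l) :: acc).reverse := by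
  rw [PySem.Chars.splitOn.go]

theorem go_nil (sep cur : List Char) (acc : List (List Char)) (fuel : Nat) :
    PySem.Chars.splitOn.go sep (fuel + 1) [] cur acc = (cur.reverse :: acc).reverse := by
  rw [PySem.Chars.splitOn.go]; simp

theorem go_no_match (sep : List Char) (c : Char) (rest cur : List Char)
    (acc : List (List Char)) (fuel : Nat) (h : sep.isPrefixOf (c :: rest) = false) :
    PySem.Chars.splitOn.go sep (fuel + 1) (c :: rest) cur acc
      = PySem.Chars.splitOn.go sep fuel rest (c :: cur) acc := by
  rw [PySem.Chars.splitOn.go]; simp [h]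

theorem go_match (sep : List Char) (c : Char) (rest cur : List Char)
    (acc : List (List Char)) (fuel : Nat) (h : sep.isPrefixOf (c :: rest) = true) :
    PySem.Chars.splitOn.go sep (fuel + 1) (c :: rest) cur acc
      = PySem.Chars.splitOn.go sep fuel (List.drop sep.length (c :: rest)) [] (cur.reverse :: acc) := by
  rw [PySem.Chars.splitOn.go]; simp [h]

theorem go_acc (sep : List Char) :
    ∀ (fuel : Nat) (l cur : List Char) (acc : List (List Char)),
      PySem.Chars.splitOn.go sep fuel l cur acc
        = acc.reverse ++ PySem.Chars.splitOn.go sep fuel l cur [] := by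
  intro fuel
  induction fuel with
  | zero => intro l cur acc; simp [go_zero]
  | succ fuel ih =>
    intro l cur acc
    cases l with
    | nil => simp [go_nil]
    | cons c rest =>
      by_cases h : sep.isPrefixOf (c :: rest) = true
      · rw [go_match sep c rest cur acc fuel h, go_match sep c rest cur [] fuel h,
          ih _ _ (cur.reverse :: acc), ih _ _ [cur.reverse]]
        simp
      · rw [go_no_match sep c rest cur acc fuel (eq_false_of_ne_true h),
          go_no_match sep c rest cur [] fuel (eq_false_of_ne_true h), ih _ _ acc]

theorem go_head (sep : List Char) :
    ∀ (fuel : Nat) (l cur : List Char),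
      ∃ t rest, PySem.Chars.splitOn.go sep fuel l cur [] = (cur.reverse ++ t) :: rest := by
  intro fuel
  induction fuel with
  | zero => intro l cur; exact ⟨l, [], by simp [go_zero]⟩
  | succ fuel ih =>
    intro l cur
    cases l with
    | nil => exact ⟨[], [], by simp [go_nil]⟩
    | cons c rest =>
      by_cases h : sep.isPrefixOf (c :: rest) = true
      · refine ⟨[], PySem.Chars.splitOn.go sep fuel (List.drop sep.length (c :: rest)) [] [], ?_⟩
        rw [go_match sep c rest cur [] fuel h, go_acc]
        simp
      · obtain ⟨t, r, ht⟩ := ih rest (c :: cur)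
        refine ⟨c :: t, r, ?_⟩
        rw [go_no_match sep c rest cur [] fuel (eq_false_of_ne_true h), ht]
        simp

theorem splitOn_cons_ne (c : Char) (l' : List Char) (hc : c ≠ '.') :
    ∃ t rest, PySem.Chars.splitOn (c :: l') ['.'] = (c :: t) :: rest := by
  have hpre : (['.'] : List Char).isPrefixOf (c :: l') = false := by
    simp [List.isPrefixOf]; exact fun h => absurd h.symm hc
  obtain ⟨t, r, ht⟩ := go_head ['.'] (l'.length + 1) l' [c]
  exact ⟨t, r, by
    unfold PySem.Chars.splitOn
    rw [show (c :: l').length + 1 = (l'.length + 1) + 1 by simp,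
      go_no_match ['.'] c l' [] [] (l'.length + 1) hpre, ht]
    simp⟩

theorem splitOn_cons_dot (l' : List Char) :
    ∃ t rest, PySem.Chars.splitOn ('.' :: l') ['.'] = [] :: t :: rest := by
  have hpre : (['.'] : List Char).isPrefixOf ('.' :: l') = true := by simp [List.isPrefixOf]
  obtain ⟨t, r, ht⟩ := go_head ['.'] (l'.length + 1) l' []
  exact ⟨t, r, by
    unfold PySem.Chars.splitOn
    rw [show ('.' :: l').length + 1 = (l'.length + 1) + 1 by simp,
      go_match ['.'] '.' l' [] [] (l'.length + 1) hpre, go_acc]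
    simp at ht ⊢
    rw [ht]⟩

-- ---- string-level bridges ----
theorem join_concat3 (p c : List Char) :
    PySem.Str.join "" [String.ofList p, ".", String.ofList c] = String.ofList (p ++ '.' :: c) := by
  simp [PySem.Str.join, PySem.Chars.join, List.intercalate]

theorem joinDot_map (l : List (List Char)) :
    PySem.Str.join "." (l.map String.ofList) = String.ofList (PySem.Chars.join ['.'] l) := by
  simp [PySem.Str.join, List.map_map, Function.comp_def]

-- ---- A's fold computes scanPref ----
theorem A_core :
    ∀ (cs : List (List Char)) (p : List Char) (acc : List String), p ≠ [] →
      ((cs.map String.ofList).foldl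
        (fun (st : List String × String) chunk =>
          let prefix_ := if st.2 ≠ "" then PySem.Str.join "" [st.2, ".", chunk] else chunk
          (st.1 ++ [prefix_], prefix_))
        (acc ++ [String.ofList p], String.ofList p)).1
      = acc ++ (scanPref p cs).map String.ofList := by
  intro cs
  induction cs with
  | nil => intro p acc _; simp [scanPref]
  | cons c cs ih =>
    intro p acc hp
    have hne : (String.ofList p ≠ "") = True := by simp [hp]
    simp only [List.map_cons, List.foldl_cons, hne, if_pos trivial, join_concat3]
    have := ih (p ++ '.' :: c) (acc ++ [String.ofList p]) (by simp)
    simp only [List.append_assoc] at this ⊢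
    rw [this]
    simp [scanPref]

-- A's list always extends the accumulator
theorem A_fold_acc :
    ∀ (l : List String) (acc : List String) (p : String),
      ∃ u, (l.foldl
        (fun (st : List String × String) chunk =>
          let prefix_ := if st.2 ≠ "" then PySem.Str.join "" [st.2, ".", chunk] else chunk
          (st.1 ++ [prefix_], prefix_))
        (acc, p)).1 = acc ++ u := by
  intro l
  induction l with
  | nil => intro acc p; exact ⟨[], by simp⟩
  | cons x l ih =>
    intro acc p
    rw [List.foldl_cons]
    obtain ⟨u, hu⟩ := ih (acc ++ [if p ≠ "" then PySem.Str.join "" [p, ".", x] else x])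
      (if p ≠ "" then PySem.Str.join "" [p, ".", x] else x)
    exact ⟨[if p ≠ "" then PySem.Str.join "" [p, ".", x] else x] ++ u,
      hu.trans (List.append_assoc _ _ _)⟩

-- ---- B's range-map computes scanPref ----
theorem pyRange_shape :
    ∀ (n : Nat), PySem.List.pyRange 1 ((n : Int) + 1)
      = (List.range n).map (fun k => (((k + 1 : Nat)) : Int)) := by
  intro n
  induction n with
  | zero => simp [PySem.List.pyRange]
  | succ n ih =>
    rw [show (((n + 1 : Nat) : Int) + 1) = ((n : Int) + 1 + 1) by push_cast; ring]
    rw [PySem.List.pyRange_one_append 1 ((n : Int) + 1) ((n : Int) + 1 + 1) (by omega) (by omega),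
      ih, PySem.List.pyRange_one_cons (a := (n : Int) + 1) (by omega)]
    have h0 : PySem.List.pyRange ((n : Int) + 1 + 1) ((n : Int) + 1 + 1) = [] := by
      simp [PySem.List.pyRange]
    rw [h0, List.range_succ, List.map_append]
    push_cast
    simp

theorem B_core :
    ∀ (cs : List (List Char)) (h : List Char),
      (List.range (cs.length + 1)).map
        (fun k => PySem.Chars.join ['.'] ((h :: cs).take (k + 1)))
      = scanPref h cs := by
  intro cs
  induction cs with
  | nil => simp [scanPref, PySem.Chars.join_singleton]
  | cons c cs ih =>
    intro h
    simp only [List.length_cons]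
    rw [List.range_succ_eq_map]
    simp only [List.map_cons, List.map_map]
    have hstep : ∀ k : Nat,
        PySem.Chars.join ['.'] ((h :: c :: cs).take (k + 1 + 1))
          = (h ++ ['.']) ++ PySem.Chars.join ['.'] ((c :: cs).take (k + 1)) := by
      intro k
      simp [List.take_succ_cons, PySem.Chars.join_cons_cons]
    have : (List.range (cs.length + 1)).map
        ((fun k => PySem.Chars.join ['.'] ((h :: c :: cs).take (k + 1))) ∘ (fun k => k + 1))
        = (List.range (cs.length + 1)).map
          (fun k => (h ++ ['.']) ++ PySem.Chars.join ['.'] ((c :: cs).take (k + 1))) := by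
      exact List.map_congr_left (fun k _ => hstep k)
    rw [this, show (fun k => (h ++ ['.']) ++ PySem.Chars.join ['.'] ((c :: cs).take (k + 1)))
        = (fun x => (h ++ ['.']) ++ x) ∘ (fun k => PySem.Chars.join ['.'] ((c :: cs).take (k + 1)))
      from rfl, ← List.map_map, ih c, ← scanPref_append (h ++ ['.']) cs c]
    simp [scanPref, PySem.Chars.join_singleton]

-- B's whole chunk-processing pipeline, for an arbitrary chunk list h :: cs
theorem B_all (h : List Char) (cs : List (List Char)) :
    (PySem.List.pyRange 1 (((((h :: cs).map String.ofList).length : Nat) : Int) + 1)).map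
      (fun i => PySem.Str.join "." (PySem.List.slice ((h :: cs).map String.ofList) none (some i)))
    = (scanPref h cs).map String.ofList := by
  rw [show ((h :: cs).map String.ofList).length = cs.length + 1 from by simp]
  rw [pyRange_shape (cs.length + 1), List.map_map]
  rw [← B_core cs h, List.map_map]
  refine List.map_congr_left (fun k _ => ?_)
  simp only [Function.comp_apply]
  rw [PySem.List.slice_to_natCast, ← List.map_take, joinDot_map]

-- both ports, written via the chunk list of the split
theorem A_eval (c : Char) (t : List Char) (rest : List (List Char)) (ns : String)
    (hns : ns ≠ "") (hsplit : PySem.Chars.splitOn ns.toList ['.'] = (c :: t) :: rest) :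
    expand_namespaces_py (some ns) = (scanPref (c :: t) rest).map String.ofList := by
  unfold expand_namespaces_py
  simp only [if_neg hns]
  rw [show PySem.Str.split? ns "." = some (((c :: t) :: rest).map String.ofList) by
    simp [PySem.Str.split?, PySem.Chars.split?, hsplit]]
  have step : ∀ (X Y : String), (if ("" : String) ≠ "" then X else Y) = Y :=
    fun X Y => if_neg (by simp)
  simp only [Option.getD_some, List.map_cons, List.foldl_cons, step]
  have := A_core rest (c :: t) [] (by simp)
  simpa using this

theorem B_eval (h : List Char) (rest : List (List Char)) (ns : String)
    (hns : ns ≠ "") (hsplit : PySem.Chars.splitOn ns.toList ['.'] = h :: rest) :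
    expand_namespaces_py_alt (some ns) = (scanPref h rest).map String.ofList := by
  unfold expand_namespaces_py_alt
  simp only [if_neg hns]
  rw [show PySem.Str.split? ns "." = some ((h :: rest).map String.ofList) by
    simp [PySem.Str.split?, PySem.Chars.split?, hsplit]]
  simp only [Option.getD_some]
  exact B_all h rest

-- ===== VERDICT (by name: the statement is the Claim_ definition above) =====
theorem expand_namespaces_py_spec : Claim_unchanged_expand_namespaces_py := by
  unfold Claim_unchanged_expand_namespaces_py
  intro ns _
  unfold Spec_expand_namespaces_py
  intro hD
  cases ns with
  | none => rfl
  | some s =>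
    by_cases hs : s = ""
    · subst hs; rfl
    · have hD' : PySem.Str.startswith s "." = false := by
        unfold D_expand_namespaces_py at hD
        simpa using hD
      have hne : s.toList ≠ [] := by
        simpa [String.toList_eq_nil_iff] using hs
      obtain ⟨c, l', hl⟩ := List.exists_cons_of_ne_nil hne
      have hc : c ≠ '.' := by
        intro hceq
        rw [PySem.Str.startswith_eq] at hD'
        have : (".".toList : List Char) <+: s.toList := by
          rw [hl, hceq]; exact ⟨l', rfl⟩
        rw [← PySem.Chars.startswith_iff] at this
        rw [this] at hD'
        exact absurd hD' (by simp)
      obtain ⟨t, rest, hsplit⟩ := splitOn_cons_ne c l' hc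
      rw [A_eval c t rest s hs (by rw [hl]; exact hsplit),
        B_eval (c :: t) rest s hs (by rw [hl]; exact hsplit)]

theorem expand_namespaces_py_changed : Claim_changed_expand_namespaces_py := by
  unfold Claim_changed_expand_namespaces_py
  refine ⟨by decide, by decide, ?_, ?_, by decide⟩ <;> rfl

theorem expand_namespaces_py_tight : Claim_exact_expand_namespaces_py := by
  unfold Claim_exact_expand_namespaces_py
  intro ns _ hD
  unfold D_expand_namespaces_py at hD
  cases ns with
  | none => simp at hD
  | some s =>
    simp only [Option.map_some, Option.getD_some] at hD
    have hpre : (".".toList : List Char) <+: s.toList := by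
      rw [PySem.Str.startswith_eq, PySem.Chars.startswith_iff] at hD
      exact hD
    obtain ⟨l', hl⟩ := hpre
    have hl : s.toList = '.' :: l' := by rw [← hl]; rfl
    have hs : s ≠ "" := by
      intro h; subst h; simp at hl
    obtain ⟨t, rest, hsplit⟩ := splitOn_cons_dot l'
    -- A's element at index 1 is `ofList t`; B's is `ofList ('.' :: t)`
    have hA : (expand_namespaces_py (some s))[1]? = some (String.ofList t) := by
      unfold expand_namespaces_py
      simp only [if_neg hs]
      rw [show PySem.Str.split? s "." = some (([] :: t :: rest).map String.ofList) by
        simp [PySem.Str.split?, PySem.Chars.split?, hl, hsplit]]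
      have step : ∀ (X Y : String), (if ("" : String) ≠ "" then X else Y) = Y :=
        fun X Y => if_neg (by simp)
      simp only [Option.getD_some, List.map_cons, List.foldl_cons, step, String.ofList_nil]
      obtain ⟨u, hu⟩ := A_fold_acc (rest.map String.ofList)
        (([] ++ [("" : String)]) ++ [String.ofList t]) (String.ofList t)
      rw [hu]
      simp
    have hB : (expand_namespaces_py_alt (some s))[1]? = some (String.ofList ('.' :: t)) := by
      rw [B_eval [] (t :: rest) s hs (by rw [hl]; exact hsplit)]
      simp only [scanPref, List.nil_append, List.map_cons]
      cases rest <;> simp [scanPref]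
    intro hAB
    rw [hAB, hB] at hA
    have : ('.' :: t) = t := by
      have := Option.some.inj hA
      have h2 := congrArg String.toList this
      simp at h2
    simpa using congrArg List.length this
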